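-- pv_equiv track=rewrite | github.com/Javopan/SMASsHV2.0 | funciones/smassh_process.py | tg_answers_process
-- ===== SOURCE A (Python) =====
-- def tg_answers_process(answer, op, cl, separator, line_split):
--     """
--     Does pretty print for a string of character it will use tabs
--     from: <hola<como<te va>>>
--     to:
--         hola
--             como
--                 te va
--     it will count the number of open and close characters to create the exit
--     :param answer: str, string of characters
--     :param op: str, opening character eg. < { (, etc
--     :param cl: str, closing character eg. > } ), etc
--     :param separator: str, control character that will be added
--     :param line_split: str, sontrol character to split lines inside op's and cl's
--     :return: formatted answer
--     """
--     multiplier = 0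
--     last = 0
--     output = ''
--     answer_line = ''.join(answer)
--     if op in answer_line:
--         for index, char in enumerate(answer_line):
--             if char == op:
--                 multiplier += 1
--                 output += answer_line[last: index]
--                 output += '\n' + separator * multiplier
--                 last = index + 1
--             elif char == cl:
--                 output += answer_line[last: index]
--                 multiplier -= 1
--                 output += '\n' + separator * multiplier
--                 last = index + 1
--             elif char == ';':
--                 output += answer_line[last: index]
--                 output += '\n' + separator * multiplier
--                 last = index + 1
--     else:
--         output = '\n'.join(answer)
--     return output
-- ===== SOURCE B (Python) =====
-- def _split_first(s, op, cl):
--     # first occurrence of op/cl/';' in s: (prefix before it, the char, suffix after it)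
--     for i, ch in enumerate(s):
--         if ch == op or ch == cl or ch == ';':
--             return s[:i], ch, s[i + 1:]
--     return None
--
--
-- def tg_answers_process(answer, op, cl, separator, line_split):
--     answer_line = ''.join(answer)
--     if op not in answer_line:
--         return '\n'.join(answer)
--     pieces = []
--     rest = answer_line
--     multiplier = 0
--     while True:
--         found = _split_first(rest, op, cl)
--         if found is None:
--             return ''.join(pieces)
--         pre, ch, rest = found
--         if ch == op:
--             multiplier += 1
--         elif ch == cl:
--             multiplier -= 1
--         pieces.append(pre + '\n' + separator * multiplier)
-- ===== Notes on version B (the rewrite author's own statement) =====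
-- stated objective: alternative
-- what changed: Replaced A's single indexed pass (enumerate over the whole line with a `last` cursor, slices into it and repeated string concatenation) by a split-driven loop: a helper cuts the line at the first occurrence of op/cl/';' and the driver renders one piece per cut and recurses on the suffix, stopping when no special character is left (which drops the trailing text exactly as A does); the `op in answer_line` guard and the ' '.join(answer) else branch are kept.
import Mathlib
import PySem

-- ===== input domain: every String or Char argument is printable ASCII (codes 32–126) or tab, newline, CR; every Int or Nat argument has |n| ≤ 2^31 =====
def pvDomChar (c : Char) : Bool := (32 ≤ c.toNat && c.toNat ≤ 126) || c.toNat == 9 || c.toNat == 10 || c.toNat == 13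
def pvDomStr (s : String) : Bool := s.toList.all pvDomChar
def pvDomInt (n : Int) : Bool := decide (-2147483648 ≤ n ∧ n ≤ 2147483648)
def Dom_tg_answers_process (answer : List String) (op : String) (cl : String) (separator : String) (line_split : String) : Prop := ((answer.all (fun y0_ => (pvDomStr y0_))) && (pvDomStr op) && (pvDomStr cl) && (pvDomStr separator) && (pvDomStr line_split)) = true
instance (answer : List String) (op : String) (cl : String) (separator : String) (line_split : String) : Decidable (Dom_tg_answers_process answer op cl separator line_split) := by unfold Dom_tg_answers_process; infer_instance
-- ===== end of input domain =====

-- B replaces A's indexed single pass (enumerate + `last` cursor + slices into the whole line) by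
-- repeated splitting: a helper cuts off the text up to the first op/cl/';', the driver loop renders
-- one piece per cut and stops when no special character remains (objective: alternative).
-- `line_split` is unused by A and stays unused.

-- ===== PORT A =====
-- one iteration of A's for-loop; state = (multiplier, last, output), item = (index, char)
def tgA_step (opL clL sep lin : List Char) (st : Int × Int × List Char) (p : Int × Char) : Int × Int × List Char :=
  if [p.2] = opL then
    (st.1 + 1, p.1 + 1,
      st.2.2 ++ PySem.List.slice lin (some st.2.1) (some p.1) ++ ('\n' :: PySem.List.pyRepeat sep (st.1 + 1)))
  else if [p.2] = clL then
    (st.1 - 1, p.1 + 1,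
      st.2.2 ++ PySem.List.slice lin (some st.2.1) (some p.1) ++ ('\n' :: PySem.List.pyRepeat sep (st.1 - 1)))
  else if p.2 = ';' then
    (st.1, p.1 + 1,
      st.2.2 ++ PySem.List.slice lin (some st.2.1) (some p.1) ++ ('\n' :: PySem.List.pyRepeat sep st.1))
  else st

def tg_answers_process (answer : List String) (op : String) (cl : String) (separator : String) (line_split : String) : String :=
  let lineL := PySem.Chars.join [] (answer.map String.toList)
  if PySem.Chars.isIn op.toList lineL then
    String.ofList ((PySem.List.enumerate lineL 0).foldl
      (tgA_step op.toList cl.toList separator.toList lineL) (0, 0, [])).2.2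
  else
    PySem.Str.join "\n" answer

-- ===== PORT B =====
-- _split_first: prefix before the first op/cl/';', that char, and the suffix after it
def tgSplitFirst (opL clL : List Char) : List Char → Option (List Char × Char × List Char)
  | [] => none
  | c :: rest =>
    if [c] = opL ∨ [c] = clL ∨ c = ';' then some ([], c, rest)
    else (tgSplitFirst opL clL rest).map (fun q => (c :: q.1, q.2.1, q.2.2))

theorem tgSplitFirst_shrinks (opL clL : List Char) :
    ∀ (s pre rest' : List Char) (c : Char),
      tgSplitFirst opL clL s = some (pre, c, rest') → rest'.length < s.length := by
  intro s
  induction s with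
  | nil => intro pre rest' c h; simp [tgSplitFirst] at h
  | cons d s' ih =>
    intro pre rest' c h
    by_cases hd : [d] = opL ∨ [d] = clL ∨ d = ';'
    · simp [tgSplitFirst, hd] at h
      obtain ⟨_, _, h3⟩ := h
      simp [← h3]
    · simp only [tgSplitFirst, if_neg hd] at h
      rcases Option.map_eq_some_iff.mp h with ⟨⟨p, cc, r⟩, hsome, heq⟩
      injection heq with h1 h23
      injection h23 with h2 h3
      subst h1; subst h2; subst h3
      have := ih p r cc hsome
      simpa using Nat.lt_succ_of_lt this

-- the while loop: cut, render one piece, continue on the suffix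
def tgB_loop (opL clL sep : List Char) (pieces : List (List Char)) (rest : List Char) (m : Int) :
    List (List Char) :=
  match h : tgSplitFirst opL clL rest with
  | none => pieces
  | some (pre, c, rest') =>
    let m' := if [c] = opL then m + 1 else if [c] = clL then m - 1 else m
    tgB_loop opL clL sep (pieces ++ [pre ++ '\n' :: PySem.List.pyRepeat sep m']) rest' m'
termination_by rest.length
decreasing_by exact tgSplitFirst_shrinks opL clL rest _ _ _ h

def tg_answers_process_alt (answer : List String) (op : String) (cl : String) (separator : String) (line_split : String) : String :=
  let lineL := PySem.Chars.join [] (answer.map String.toList)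
  if PySem.Chars.isIn op.toList lineL then
    String.ofList (tgB_loop op.toList cl.toList separator.toList [] lineL 0).flatten
  else
    PySem.Str.join "\n" answer

-- ===== PRECONDITION & SPEC =====
def Spec_tg_answers_process (answer : List String) (op : String) (cl : String) (separator : String) (line_split : String) (out : String) : Prop := out = tg_answers_process_alt answer op cl separator line_split
instance (answer : List String) (op : String) (cl : String) (separator : String) (line_split : String) (out : String) : Decidable (Spec_tg_answers_process answer op cl separator line_split out) := by unfold Spec_tg_answers_process; infer_instance

-- ===== CLAIM =====
def Claim_equal_tg_answers_process : Prop := ∀ (answer : List String) (op : String) (cl : String) (separator : String) (line_split : String), Dom_tg_answers_process answer op cl separator line_split → Spec_tg_answers_process answer op cl separator line_split (tg_answers_process answer op cl separator line_split)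

-- ===== LEMMAS AND PROOFS =====

-- splitFirst = none ↔ no special character in s
theorem tgSplitFirst_none (opL clL : List Char) :
    ∀ (s : List Char), tgSplitFirst opL clL s = none →
      ∀ c ∈ s, ¬([c] = opL ∨ [c] = clL ∨ c = ';') := by
  intro s
  induction s with
  | nil => simp
  | cons d s' ih =>
    intro h c hc
    by_cases hd : [d] = opL ∨ [d] = clL ∨ d = ';'
    · simp [tgSplitFirst, hd] at h
    · simp [tgSplitFirst, hd] at h
      rcases List.mem_cons.mp hc with rfl | hc'
      · exact hd
      · exact ih h c hc'

-- splitFirst = some (pre, c, rest') decomposes s with a special-free prefix and special c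
theorem tgSplitFirst_some (opL clL : List Char) :
    ∀ (s pre rest' : List Char) (c : Char),
      tgSplitFirst opL clL s = some (pre, c, rest') →
      s = pre ++ c :: rest' ∧ (∀ d ∈ pre, ¬([d] = opL ∨ [d] = clL ∨ d = ';')) ∧
        ([c] = opL ∨ [c] = clL ∨ c = ';') := by
  intro s
  induction s with
  | nil => intro pre rest' c h; simp [tgSplitFirst] at h
  | cons d s' ih =>
    intro pre rest' c h
    by_cases hd : [d] = opL ∨ [d] = clL ∨ d = ';'
    · simp [tgSplitFirst, hd] at h
      obtain ⟨h1, h2, h3⟩ := h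
      subst h1; subst h2; subst h3
      exact ⟨rfl, by simp, hd⟩
    · simp only [tgSplitFirst, if_neg hd] at h
      rcases Option.map_eq_some_iff.mp h with ⟨⟨p, cc, r⟩, hsome, heq⟩
      injection heq with h1 h23
      injection h23 with h2 h3
      subst h1; subst h2; subst h3
      obtain ⟨hs, hpre, hspec⟩ := ih p r cc hsome
      refine ⟨by simp [hs], ?_, hspec⟩
      intro e he
      rcases List.mem_cons.mp he with rfl | he'
      · exact hd
      · exact hpre e he'

-- unfolding equations for tgB_loop
theorem tgB_loop_eq_none (opL clL sep : List Char) (pieces : List (List Char))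
    (rest : List Char) (m : Int) (h : tgSplitFirst opL clL rest = none) :
    tgB_loop opL clL sep pieces rest m = pieces := by
  rw [tgB_loop]
  split
  · rfl
  · next pre c rest' heq => rw [h] at heq; cases heq

theorem tgB_loop_eq_some (opL clL sep : List Char) (pieces : List (List Char))
    (rest : List Char) (m : Int) (pre rest' : List Char) (c : Char)
    (h : tgSplitFirst opL clL rest = some (pre, c, rest')) :
    tgB_loop opL clL sep pieces rest m
      = tgB_loop opL clL sep
          (pieces ++ [pre ++ '\n' :: PySem.List.pyRepeat sep
            (if [c] = opL then m + 1 else if [c] = clL then m - 1 else m)])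
          rest' (if [c] = opL then m + 1 else if [c] = clL then m - 1 else m) := by
  rw [tgB_loop]
  split
  · next hnone => rw [h] at hnone; cases hnone
  · next p cc r heq =>
      rw [h] at heq
      injection heq with hT
      injection hT with h1 h23
      injection h23 with h2 h3
      subst h1; subst h2; subst h3
      rfl

-- A's step is the identity on non-special characters, so the fold skips a special-free block
theorem tgA_fold_skip (opL clL sep lin : List Char) :
    ∀ (pre : List Char) (k : Int) (st : Int × Int × List Char),
      (∀ d ∈ pre, ¬([d] = opL ∨ [d] = clL ∨ d = ';')) →
      (PySem.List.enumerate pre k).foldl (tgA_step opL clL sep lin) st = st := by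
  intro pre
  induction pre with
  | nil => intro k st _; simp [PySem.List.enumerate]
  | cons d pre' ih =>
    intro k st hd
    have hd0 := hd d (by simp)
    push_neg at hd0
    rw [PySem.List.enumerate_cons]
    simp only [List.foldl_cons]
    have : tgA_step opL clL sep lin st (k, d) = st := by
      simp [tgA_step, hd0.1, hd0.2.1, hd0.2.2]
    rw [this]
    exact ih (k + 1) st (fun e he => hd e (by simp [he]))

-- main invariant: A's fold from a fresh cursor equals B's piece-by-piece loop
theorem tg_loop_eq (opL clL sep lin : List Char) :
    ∀ (n : Nat) (cs : List Char) (k : Nat) (m : Int) (pieces : List (List Char)),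
      cs.length ≤ n → lin.drop k = cs →
      ((PySem.List.enumerate cs (k : Int)).foldl (tgA_step opL clL sep lin)
          (m, (k : Int), pieces.flatten)).2.2
        = (tgB_loop opL clL sep pieces cs m).flatten := by
  intro n
  induction n with
  | zero =>
    intro cs k m pieces hlen hdrop
    have hnil : cs = [] := List.eq_nil_of_length_eq_zero (Nat.le_zero.mp hlen)
    subst hnil
    rw [tgB_loop_eq_none opL clL sep pieces [] m (by simp [tgSplitFirst])]
    simp [PySem.List.enumerate]
  | succ n ih =>
    intro cs k m pieces hlen hdrop
    match hsplit : tgSplitFirst opL clL cs with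
    | none =>
      rw [tgA_fold_skip opL clL sep lin cs (k : Int) _ (tgSplitFirst_none opL clL cs hsplit)]
      rw [tgB_loop_eq_none opL clL sep pieces cs m hsplit]
    | some (pre, c, rest') =>
      obtain ⟨hcs, hpre, hspec⟩ := tgSplitFirst_some opL clL cs pre rest' c hsplit
      subst hcs
      rw [PySem.List.enumerate_append, List.foldl_append]
      rw [tgA_fold_skip opL clL sep lin pre (k : Int) _ hpre]
      rw [PySem.List.enumerate_cons]
      simp only [List.foldl_cons]
      have hslice : PySem.List.slice lin (some (k : Int)) (some ((k : Int) + pre.length))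
          = pre := by
        have h1 := PySem.List.slice_natCast lin k (k + pre.length)
        have hc : ((k + pre.length : Nat) : Int) = (k : Int) + pre.length := by push_cast; ring
        rw [hc] at h1
        rw [h1, hdrop]
        have h2 : k + pre.length - k = pre.length := by omega
        rw [h2]
        exact List.take_left
      have hstep : tgA_step opL clL sep lin (m, (k : Int), pieces.flatten) ((k : Int) + pre.length, c)
          = ((if [c] = opL then m + 1 else if [c] = clL then m - 1 else m),
             (k : Int) + pre.length + 1,
             (pieces ++ [pre ++ '\n' :: PySem.List.pyRepeat sep
               (if [c] = opL then m + 1 else if [c] = clL then m - 1 else m)]).flatten) := by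
        simp only [tgA_step]
        split_ifs with h1 h2 h3
        · simp [hslice, List.flatten_append, List.append_assoc]
        · simp [hslice, List.flatten_append, List.append_assoc]
        · simp [hslice, List.flatten_append, List.append_assoc]
        · exact absurd hspec (by tauto)
      rw [hstep]
      have hdrop' : lin.drop (k + pre.length + 1) = rest' := by
        have h2 : (lin.drop k).drop (pre.length + 1) = lin.drop (k + (pre.length + 1)) :=
          List.drop_drop
        rw [hdrop] at h2
        have h3 : (pre ++ c :: rest').drop (pre.length + 1) = rest' := by
          simp
        rw [h3] at h2
        rw [show k + pre.length + 1 = k + (pre.length + 1) from by omega]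
        exact h2.symm
      have hlen' : rest'.length ≤ n := by
        have hl : (pre ++ c :: rest').length ≤ n + 1 := hlen
        simp at hl
        omega
      have hIH := ih rest' (k + pre.length + 1)
        (if [c] = opL then m + 1 else if [c] = clL then m - 1 else m)
        (pieces ++ [pre ++ '\n' :: PySem.List.pyRepeat sep
          (if [c] = opL then m + 1 else if [c] = clL then m - 1 else m)]) hlen' hdrop'
      have hcast : ((k + pre.length + 1 : Nat) : Int) = (k : Int) + pre.length + 1 := by
        push_cast; ring
      rw [hcast] at hIH
      rw [tgB_loop_eq_some opL clL sep pieces _ m pre rest' c hsplit]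
      exact hIH

theorem tg_eq_aux (answer : List String) (op cl separator line_split : String) :
    tg_answers_process answer op cl separator line_split
      = tg_answers_process_alt answer op cl separator line_split := by
  unfold tg_answers_process tg_answers_process_alt
  set lineL := PySem.Chars.join [] (answer.map String.toList) with hline
  by_cases h : PySem.Chars.isIn op.toList lineL
  · simp only [h, if_true]
    have := tg_loop_eq op.toList cl.toList separator.toList lineL lineL.length lineL 0 0 []
      (le_refl _) (by simp)
    simpa using congrArg String.ofList this
  · simp [h]

-- ===== VERDICT =====
theorem tg_answers_process_spec : Claim_equal_tg_answers_process := by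
  intro answer op cl separator line_split _
  exact tg_eq_aux answer op cl separator line_split
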